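-- pv_equiv track=rewrite | github.com/lasserewers/movie-finder | backend/main.py | _parse_csv_int_values
-- ===== SOURCE A (Python) =====
-- def _parse_csv_int_values(raw: str | None, max_items: int = 12) -> list[int]:
--     if not raw:
--         return []
--     values: list[int] = []
--     seen: set[int] = set()
--     for token in raw.split(","):
--         token = token.strip()
--         if not token or not token.isdigit():
--             continue
--         value = int(token)
--         if value <= 0 or value in seen:
--             continue
--         seen.add(value)
--         values.append(value)
--         if len(values) >= max_items:
--             break
--     return values
-- ===== SOURCE B (Python) =====
-- def _parse_csv_int_values(raw, max_items=12):
--     if not raw: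
--         return []
--     vals = [int(t) for t in (tok.strip() for tok in raw.split(",")) if t.isdigit() and int(t) > 0]
--     # stable sort groups equal values together; ties keep index order
--     order = sorted(range(len(vals)), key=lambda i: vals[i])
--     if not order:
--         return []
--     # run heads of the sorted grouping = smallest index of each distinct value
--     firsts = sorted([order[0]] + [i for p, i in zip(order, order[1:]) if vals[p] != vals[i]])
--     out = []
--     for i in firsts:
--         out.append(vals[i])
--         if len(out) >= max_items:
--             break
--     return out
-- ===== Notes on version B (the rewrite author's own statement) =====
-- stated objective: alternative
-- what changed: A's single stateful pass with a hash seen-set is replaced by a sort-based dedup: stable-sort the indices of the valid values by value, keep the run heads (= the smallest index of each distinct value), re-sort those indices and emit their values up to the cap.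
import Mathlib
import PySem

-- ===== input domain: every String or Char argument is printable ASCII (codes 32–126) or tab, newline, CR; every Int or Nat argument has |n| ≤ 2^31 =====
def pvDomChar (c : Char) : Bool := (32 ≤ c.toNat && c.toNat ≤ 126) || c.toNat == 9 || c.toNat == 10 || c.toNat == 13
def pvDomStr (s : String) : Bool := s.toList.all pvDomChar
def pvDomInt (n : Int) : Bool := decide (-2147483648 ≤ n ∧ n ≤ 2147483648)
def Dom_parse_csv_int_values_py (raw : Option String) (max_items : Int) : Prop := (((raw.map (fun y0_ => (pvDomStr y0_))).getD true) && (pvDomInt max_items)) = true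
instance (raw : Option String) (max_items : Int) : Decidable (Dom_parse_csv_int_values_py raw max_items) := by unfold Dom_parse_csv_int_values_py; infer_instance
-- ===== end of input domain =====

-- B replaces A's single stateful loop (seen-set dedup with an in-loop cap) by a sort-based dedup:
-- stable-sort the indices by value, keep the run heads (= first occurrence of each distinct value),
-- re-sort those indices and emit their values up to the cap; objective: alternative algorithm.

-- ===== PORT A =====
-- the for-loop of A: state (values, seen); early 'break' returns values immediately
def pvLoopA (tokens : List (List Char)) (values : List Int) (seen : PySem.Set Int) (max_items : Int) : List Int :=
  match tokens with
  | [] => values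
  | tok :: rest =>
    let t := PySem.Chars.strip tok
    if t.length = 0 || !PySem.Chars.strIsdigit t then
      pvLoopA rest values seen max_items
    else
      -- int(token): strIsdigit guarantees ofChars? = some here, getD 0 is its total form
      let v := (PySem.Int.ofChars? t).getD 0
      if decide (v ≤ 0) || PySem.Set.contains seen v then
        pvLoopA rest values seen max_items
      else
        let values' := values ++ [v]
        if decide (max_items ≤ (values'.length : Int)) then values'
        else pvLoopA rest values' (PySem.Set.add seen v) max_items

def parse_csv_int_values_py (raw : Option String) (max_items : Int) : List Int :=
  match raw with
  | none => []
  | some s =>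
    if s.toList.length = 0 then []  -- 'if not raw'
    else pvLoopA (PySem.Chars.splitOn s.toList [',']) [] PySem.Set.empty max_items

-- ===== PORT B =====
-- [int(t) for t in (tok.strip() for tok in raw.split(",")) if t.isdigit() and int(t) > 0]
def pvValsB (s : List Char) : List Int :=
  ((PySem.Chars.splitOn s [',']).map PySem.Chars.strip).filterMap
    (fun t => if PySem.Chars.strIsdigit t && decide (0 < (PySem.Int.ofChars? t).getD 0)
              then some ((PySem.Int.ofChars? t).getD 0) else none)

-- vals[i]; every index B looks up is produced by range(len(vals)), hence in range: pyGetD … 0 is exact there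
def pvGetB (vals : List Int) (i : Int) : Int := PySem.List.pyGetD vals i 0

-- the cap loop of B: 'for i in firsts: out.append(vals[i]); if len(out) >= max_items: break'
def pvCapB (vals : List Int) (xs : List Int) (out : List Int) (max_items : Int) : List Int :=
  match xs with
  | [] => out
  | i :: rest =>
    let out' := out ++ [pvGetB vals i]
    if decide (max_items ≤ (out'.length : Int)) then out' else pvCapB vals rest out' max_items

def parse_csv_int_values_py_alt (raw : Option String) (max_items : Int) : List Int :=
  match raw with
  | none => []
  | some s =>
    if s.toList.length = 0 then []  -- 'if not raw'
    else
      let vals := pvValsB s.toList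
      -- order = sorted(range(len(vals)), key=lambda i: vals[i])
      let order := PySem.List.sorted (PySem.List.pyRange 0 (vals.length : Int) 1) (fun i => pvGetB vals i)
      match order with
      | [] => []  -- 'if not order'
      | o0 :: rest =>
        -- firsts = sorted([order[0]] + [i for p, i in zip(order, order[1:]) if vals[p] != vals[i]])
        let firsts := PySem.List.sorted
          (o0 :: (((o0 :: rest).zip rest).filterMap
             (fun pi => if !(pvGetB vals pi.1 == pvGetB vals pi.2) then some pi.2 else none)))
          (fun i => i)
        pvCapB vals firsts [] max_items

-- ===== PRECONDITION & SPEC =====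
def Spec_parse_csv_int_values_py (raw : Option String) (max_items : Int) (out : List Int) : Prop :=
  out = parse_csv_int_values_py_alt raw max_items
instance (raw : Option String) (max_items : Int) (out : List Int) : Decidable (Spec_parse_csv_int_values_py raw max_items out) := by
  unfold Spec_parse_csv_int_values_py; infer_instance

-- ===== CLAIM =====
def Claim_equal_parse_csv_int_values_py : Prop := ∀ (raw : Option String) (max_items : Int), Dom_parse_csv_int_values_py raw max_items → Spec_parse_csv_int_values_py raw max_items (parse_csv_int_values_py raw max_items)

-- ===== LEMMAS AND PROOFS =====
-- proof-side helpers: the parsed value of one CSV token, and the list of valid values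
def pvTokVal? (tok : List Char) : Option Int :=
  let t := PySem.Chars.strip tok
  if PySem.Chars.strIsdigit t && decide (0 < (PySem.Int.ofChars? t).getD 0)
  then some ((PySem.Int.ofChars? t).getD 0) else none

def pvValidOf (raw : Option String) : List Int :=
  match raw with
  | none => []
  | some s => (PySem.Chars.splitOn s.toList [',']).filterMap pvTokVal?

theorem pvValsB_eq (s : List Char) :
    pvValsB s = (PySem.Chars.splitOn s [',']).filterMap pvTokVal? := by
  rw [pvValsB, List.filterMap_map]; rfl

-- proof-side: dedup-with-already-seen, with and without a cap
def pvDFilter (sl : List Int) (xs : List Int) : List Int :=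
  match xs with
  | [] => []
  | x :: xs => if x ∈ sl then pvDFilter sl xs else x :: pvDFilter (x :: sl) xs

def pvDTake (sl : List Int) (k : Nat) (xs : List Int) : List Int :=
  match xs with
  | [] => []
  | x :: xs => if k = 0 then [] else if x ∈ sl then pvDTake sl k xs else x :: pvDTake (x :: sl) (k - 1) xs

theorem pvDTake_zero (sl : List Int) (xs : List Int) : pvDTake sl 0 xs = [] := by
  cases xs <;> simp [pvDTake]

theorem pvDTake_eq_take (xs : List Int) : ∀ (sl : List Int) (k : Nat),
    pvDTake sl k xs = List.take k (pvDFilter sl xs) := by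
  induction xs with
  | nil => intro sl k; simp [pvDTake, pvDFilter]
  | cons x xs ih =>
    intro sl k
    rcases k with _ | k
    · rw [pvDTake_zero]; simp
    · by_cases hx : x ∈ sl
      · simp [pvDTake, pvDFilter, hx, ih]
      · simp [pvDTake, pvDFilter, hx, ih]

theorem pvFoldl_add_eq (xs : List Int) : ∀ (s : PySem.Set Int) (sl : List Int),
    (∀ w : Int, w ∈ s ↔ w ∈ sl) →
    List.foldl PySem.Set.add s xs = s ++ pvDFilter sl xs := by
  induction xs with
  | nil => intro s sl _; simp [pvDFilter]
  | cons x xs ih =>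
    intro s sl hmem
    by_cases hx : x ∈ sl
    · simp only [List.foldl_cons, pvDFilter, hx, if_pos]
      rw [show PySem.Set.add s x = s by
        simp [PySem.Set.add, PySem.Set.contains, (hmem x).mpr hx]]
      exact ih s sl hmem
    · have hxs : x ∉ s := fun h => hx ((hmem x).mp h)
      simp only [pvDFilter, hx, if_neg, not_false_iff, List.foldl_cons]
      rw [show PySem.Set.add s x = s ++ [x] by
        simp [PySem.Set.add, PySem.Set.contains, hxs]]
      rw [ih (s ++ [x]) (x :: sl) (by intro w; simp [hmem w]; tauto)]
      simp

theorem pvDedup_eq (xs : List Int) : PySem.List.dedup xs = pvDFilter [] xs := by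
  rw [PySem.List.dedup_eq_ofList, PySem.Set.ofList]
  simpa using pvFoldl_add_eq xs PySem.Set.empty [] (by simp [PySem.Set.empty])

-- characterization of A's loop: dedup of the valid values, capped at max 1 (max_items - len values)
theorem pvLoopA_eq (tokens : List (List Char)) : ∀ (values : List Int) (seen : PySem.Set Int)
    (sl : List Int) (m : Int), (∀ w : Int, w ∈ seen ↔ w ∈ sl) →
    pvLoopA tokens values seen m
      = values ++ pvDTake sl (max 1 (m - values.length).toNat) (tokens.filterMap pvTokVal?) := by
  induction tokens with
  | nil => intro values seen sl m _; simp [pvLoopA, pvDTake]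
  | cons tok rest ih =>
    intro values seen sl m hmem
    have hk1 : max 1 (m - values.length).toNat ≠ 0 := by omega
    cases hdig : PySem.Chars.strIsdigit (PySem.Chars.strip tok) with
    | false =>
      have hnone : pvTokVal? tok = none := by simp [pvTokVal?, hdig]
      simp only [pvLoopA, hdig, Bool.not_false, Bool.or_true, if_pos, List.filterMap_cons, hnone]
      exact ih values seen sl m hmem
    | true =>
      have hne : PySem.Chars.strip tok ≠ [] := by
        intro h; rw [h] at hdig; exact absurd hdig (by decide)
      have hlen : ¬ (PySem.Chars.strip tok).length = 0 := by
        simpa [List.length_eq_zero_iff] using hne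
      set v := (PySem.Int.ofChars? (PySem.Chars.strip tok)).getD 0 with hv
      by_cases hle : v ≤ 0
      · have hnone : pvTokVal? tok = none := by simp [pvTokVal?, hdig, ← hv]; omega
        have hguard : (decide ((PySem.Chars.strip tok).length = 0)
            || !PySem.Chars.strIsdigit (PySem.Chars.strip tok)) = false := by
          simp [hdig, hlen]
        simp only [pvLoopA, hguard, Bool.false_eq_true, if_neg, not_false_iff, ← hv,
          decide_eq_true_eq, hle, decide_true, Bool.true_or, if_pos,
          List.filterMap_cons, hnone]
        exact ih values seen sl m hmem
      · have hpos : 0 < v := by omega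
        have hsome : pvTokVal? tok = some v := by simp [pvTokVal?, hdig, ← hv, hpos]
        have hguard : (decide ((PySem.Chars.strip tok).length = 0)
            || !PySem.Chars.strIsdigit (PySem.Chars.strip tok)) = false := by
          simp [hdig, hlen]
        by_cases hseen : v ∈ sl
        · have hc : PySem.Set.contains seen v = true := by
            simp only [PySem.Set.contains, List.contains_iff_mem]
            exact (hmem v).mpr hseen
          have hdt : pvDTake sl (max 1 (m - values.length).toNat) (v :: rest.filterMap pvTokVal?)
              = pvDTake sl (max 1 (m - values.length).toNat) (rest.filterMap pvTokVal?) := by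
            rw [pvDTake]; simp [hseen]
          simp only [pvLoopA, hguard, Bool.false_eq_true, if_neg, not_false_iff, ← hv, hc,
            Bool.or_true, if_pos, List.filterMap_cons, hsome]
          rw [hdt]
          exact ih values seen sl m hmem
        · have hc : PySem.Set.contains seen v = false := by
            simp only [PySem.Set.contains, Bool.eq_false_iff, ne_eq, List.contains_iff_mem]
            exact fun h => hseen ((hmem v).mp h)
          have hcons : pvDTake sl (max 1 (m - values.length).toNat) (v :: rest.filterMap pvTokVal?)
              = v :: pvDTake (v :: sl) (max 1 (m - values.length).toNat - 1)
                  (rest.filterMap pvTokVal?) := by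
            rw [pvDTake]; simp [hseen]
          have hskip : (decide (v ≤ 0) || PySem.Set.contains seen v) = false := by
            rw [hc]; simp [hle]
          by_cases hbrk : m ≤ (((values ++ [v]).length : Nat) : Int)
          · have h1 : max 1 (m - values.length).toNat = 1 := by
              simp only [List.length_append, List.length_cons, List.length_nil] at hbrk; omega
            simp only [pvLoopA, hguard, Bool.false_eq_true, if_neg, not_false_iff, ← hv, hskip,
              hbrk, decide_true, if_pos, List.filterMap_cons, hsome]
            rw [hcons, h1]
            simp [pvDTake_zero]
          · have hrec := ih (values ++ [v]) (PySem.Set.add seen v) (v :: sl) m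
              (by intro w
                  rw [PySem.Set.mem_add]
                  simp only [List.mem_cons]
                  rw [hmem w]
                  tauto)
            simp only [pvLoopA, hguard, Bool.false_eq_true, if_neg, not_false_iff, ← hv, hskip,
              hbrk, decide_false, List.filterMap_cons, hsome]
            rw [hrec, hcons]
            have h2 : max 1 (m - values.length).toNat - 1
                = max 1 (m - (((values ++ [v]).length : Nat) : Int)).toNat := by
              simp only [List.length_append, List.length_cons, List.length_nil] at hbrk ⊢; omega
            rw [h2]
            simp

theorem pvA_eq (s : String) (m : Int) (h : ¬ s.toList.length = 0) :
    parse_csv_int_values_py (some s) m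
      = List.take (max 1 m.toNat) (PySem.List.dedup (pvValidOf (some s))) := by
  show (if s.toList.length = 0 then [] else pvLoopA _ [] PySem.Set.empty m) = _
  rw [if_neg h]
  rw [pvLoopA_eq _ [] PySem.Set.empty [] m (by simp [PySem.Set.empty])]
  rw [pvDTake_eq_take, ← pvDedup_eq]
  simp [pvValidOf]

-- ---------- B-side: sort-based dedup = ordered dedup ----------

-- Nat-side first-occurrence predicate
def pvFoN (vals : List Int) (i : Nat) : Bool :=
  decide (∀ j, j < i → vals.getD j 0 ≠ vals.getD i 0)

-- ordered dedup = values at first-occurrence indices, in index order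
theorem pvDFilter_firstOcc (vals : List Int) : ∀ (sl : List Int),
    pvDFilter sl vals
      = ((List.range vals.length).filter
          (fun i => decide (vals.getD i 0 ∉ sl) && pvFoN vals i)).map (fun i => vals.getD i 0) := by
  induction vals with
  | nil => intro sl; simp [pvDFilter]
  | cons x t ih =>
    intro sl
    have h0 : pvFoN (x :: t) 0 = true := by
      unfold pvFoN; simp
    have hsucc : ∀ i, pvFoN (x :: t) (i + 1)
        = (decide (x ≠ t.getD i 0) && pvFoN t i) := by
      intro i; unfold pvFoN
      rw [show (decide (x ≠ t.getD i 0) && decide (∀ j, j < i → t.getD j 0 ≠ t.getD i 0))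
            = decide ((x ≠ t.getD i 0) ∧ ∀ j, j < i → t.getD j 0 ≠ t.getD i 0) by simp]
      rw [decide_eq_decide]
      constructor
      · intro h
        exact ⟨by simpa using h 0 (Nat.succ_pos i),
               fun j hj => by simpa using h (j + 1) (by omega)⟩
      · rintro ⟨h1, h2⟩ j hj
        cases j with
        | zero => simpa using h1
        | succ j => simpa using h2 j (by omega)
    rw [List.length_cons, List.range_succ_eq_map]
    rw [List.filter_cons, List.filter_map]
    by_cases hx : x ∈ sl
    · have hP0 : (decide ((x :: t).getD 0 0 ∉ sl) && pvFoN (x :: t) 0) = false := by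
        simp [hx]
      rw [show pvDFilter sl (x :: t) = pvDFilter sl t from by simp [pvDFilter, hx]]
      rw [ih sl, hP0]
      simp only [Bool.false_eq_true, if_neg, not_false_iff, List.map_map]
      congr 1
      apply List.filter_congr
      intro i _
      simp only [Function.comp_apply, List.getD_cons_succ, hsucc, List.getD]
      by_cases hmem : t[i]?.getD 0 ∈ sl
      · simp [hmem]
      · have hne : x ≠ t[i]?.getD 0 := fun he => hmem (he ▸ hx)
        simp [hmem, hne]
    · have hP0 : (decide ((x :: t).getD 0 0 ∉ sl) && pvFoN (x :: t) 0) = true := by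
        simp [hx, h0]
      rw [show pvDFilter sl (x :: t) = x :: pvDFilter (x :: sl) t from by
        simp [pvDFilter, hx]]
      rw [ih (x :: sl), hP0]
      simp only [if_pos, List.map_cons, List.getD_cons_zero, List.map_map]
      congr 1
      congr 1
      apply List.filter_congr
      intro i _
      simp only [Function.comp_apply, List.getD_cons_succ, hsucc, List.mem_cons, List.getD]
      by_cases hmem : t[i]?.getD 0 ∈ sl
      · simp [hmem]
      · by_cases hxe : x = t[i]?.getD 0
        · simp [hmem, hxe]
        · simp [hmem, hxe, Ne.symm hxe]

-- lexicographic order on indices: by value, ties by index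
def pvLex (g : Int → Int) (a b : Int) : Prop := g a < g b ∨ (g a = g b ∧ a < b)

theorem pvInsertBy_pairwise (g : Int → Int) (x : Int) : ∀ (acc : List Int),
    acc.Pairwise (pvLex g) → (∀ a ∈ acc, a < x) →
    (PySem.List.insertBy (fun a b => decide (g a < g b)) x acc).Pairwise (pvLex g) := by
  intro acc
  induction acc with
  | nil => intro _ _; simp [PySem.List.insertBy, pvLex]
  | cons y ys ih =>
    intro hp hlt
    rw [PySem.List.insertBy]
    by_cases hxy : g x < g y
    · simp only [hxy, decide_true, if_pos]
      refine List.Pairwise.cons ?_ hp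
      intro z hz
      rcases List.mem_cons.mp hz with rfl | hz
      · exact Or.inl hxy
      · rcases (List.pairwise_cons.mp hp).1 z hz with h | ⟨h, _⟩
        · exact Or.inl (lt_trans hxy h)
        · exact Or.inl (h ▸ hxy)
    · simp only [hxy, decide_false, Bool.false_eq_true, if_neg, not_false_iff]
      refine List.Pairwise.cons ?_ (ih (List.pairwise_cons.mp hp).2
        (fun a ha => hlt a (List.mem_cons_of_mem y ha)))
      intro z hz
      rcases (PySem.List.mem_insertBy _ x z ys).mp hz with rfl | hz
      · rcases lt_or_eq_of_le (le_of_not_gt hxy) with h | h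
        · exact Or.inl h
        · exact Or.inr ⟨h, hlt y (List.mem_cons_self)⟩
      · exact (List.pairwise_cons.mp hp).1 z hz

-- stability of the stable sort: with a strictly increasing input, the output is pairwise pvLex
theorem pvFoldl_insertBy_pairwise (g : Int → Int) : ∀ (xs acc : List Int),
    acc.Pairwise (pvLex g) → (∀ a ∈ acc, ∀ y ∈ xs, a < y) → xs.Pairwise (· < ·) →
    (xs.foldl (fun acc x => PySem.List.insertBy (fun a b => decide (g a < g b)) x acc) acc).Pairwise
      (pvLex g) := by
  intro xs
  induction xs with
  | nil => intro acc h _ _; simpa using h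
  | cons x t ih =>
    intro acc hacc hcross hxs
    rw [List.foldl_cons]
    refine ih _ (pvInsertBy_pairwise g x acc hacc
      (fun a ha => hcross a ha x (List.mem_cons_self))) ?_ (List.pairwise_cons.mp hxs).2
    intro a ha y hy
    rcases (PySem.List.mem_insertBy _ x a acc).mp ha with rfl | ha
    · exact (List.pairwise_cons.mp hxs).1 y hy
    · exact hcross a ha y (List.mem_cons_of_mem x hy)

theorem pvSorted_pairwise_lex (g : Int → Int) (xs : List Int) (hxs : xs.Pairwise (· < ·)) :
    (PySem.List.sorted xs g).Pairwise (pvLex g) := by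
  rw [PySem.List.sorted_eq_foldl_insertBy]
  exact pvFoldl_insertBy_pairwise g xs [] (by simp) (by simp) hxs

-- adjacent-pair decompositions
theorem pvZipAdj_of_mem (p q : Int) : ∀ (xs : List Int), (p, q) ∈ xs.zip (xs.drop 1) →
    ∃ u v, xs = u ++ p :: q :: v := by
  intro xs
  induction xs with
  | nil => intro h; simp at h
  | cons a t ih =>
    intro h
    cases t with
    | nil => simp at h
    | cons b t' =>
      simp only [List.drop_one, List.tail_cons, List.zip_cons_cons, List.mem_cons] at h
      rcases h with h | h
      · obtain ⟨rfl, rfl⟩ := h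
        exact ⟨[], t', rfl⟩
      · obtain ⟨u, v, huv⟩ := ih (by simpa [List.drop_one] using h)
        exact ⟨a :: u, v, by rw [List.cons_append, ← huv]⟩

theorem pvMem_zipAdj (p q : Int) (u v : List Int) :
    (p, q) ∈ (u ++ p :: q :: v).zip ((u ++ p :: q :: v).drop 1) := by
  induction u with
  | nil => simp
  | cons a u ih =>
    cases u with
    | nil => simp
    | cons b u' =>
      have : (p, q) ∈ ((b :: (u' ++ p :: q :: v)).zip (u' ++ p :: q :: v)) := by
        simpa [List.drop_one] using ih
      simp only [List.cons_append, List.drop_one, List.tail_cons, List.zip_cons_cons,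
        List.mem_cons]
      exact Or.inr this

theorem pvPredDecomp (i : Int) : ∀ (xs : List Int) (x : Int), i ∈ xs →
    ∃ u p v, x :: xs = u ++ p :: i :: v := by
  intro xs
  induction xs with
  | nil => intro x h; simp at h
  | cons a t ih =>
    intro x h
    rcases List.mem_cons.mp h with rfl | h
    · exact ⟨[], x, t, rfl⟩
    · obtain ⟨u, p, v, huv⟩ := ih a h
      exact ⟨x :: u, p, v, by rw [List.cons_append, ← huv]⟩

theorem pvSel_sublist (f : Int × Int → Option Int)
    (hf : ∀ p, f p = none ∨ f p = some p.2) :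
    ∀ (xs : List Int), List.Sublist ((xs.zip (xs.drop 1)).filterMap f) (xs.drop 1) := by
  intro xs
  induction xs with
  | nil => simp
  | cons a t ih =>
    cases t with
    | nil => simp
    | cons b t' =>
      simp only [List.drop_one, List.tail_cons, List.zip_cons_cons, List.filterMap_cons]
      have ih' : List.Sublist (((b :: t').zip t').filterMap f) t' := by
        simpa [List.drop_one] using ih
      rcases hf (a, b) with hab | hab
      · rw [hab]
        exact ih'.trans (List.sublist_cons_self b t')
      · rw [hab]
        exact List.Sublist.cons₂ b ih'

-- the run heads of the sorted index list are exactly the first-occurrence indices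
theorem pvHeads_perm (vals : List Int) (o0 : Int) (rest : List Int)
    (horder : PySem.List.sorted (PySem.List.pyRange 0 (vals.length : Int) 1) (fun i => pvGetB vals i)
        = o0 :: rest) :
    (o0 :: (((o0 :: rest).zip rest).filterMap
        (fun pi => if !(pvGetB vals pi.1 == pvGetB vals pi.2) then some pi.2 else none))).Perm
      (((List.range vals.length).filter (fun i => pvFoN vals i)).map (fun i : Nat => (i : Int))) := by
  have hgetb : ∀ k : Nat, pvGetB vals (k : Int) = vals.getD k 0 := by
    intro k; simpa [pvGetB] using PySem.List.pyGetD_natCast vals k 0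
  have hfoN : ∀ k : Nat, pvFoN vals k = true ↔ ∀ j, j < k → vals.getD j 0 ≠ vals.getD k 0 := by
    intro k; unfold pvFoN; simp
  have hr_map : PySem.List.pyRange 0 (vals.length : Int) 1
      = (List.range vals.length).map (fun k : Nat => (k : Int)) :=
    PySem.List.pyRange_zero_natCast vals.length
  have hcast_inj : Function.Injective (fun k : Nat => (k : Int)) := by
    intro a b h; simpa using h
  have hr_lt : (PySem.List.pyRange 0 (vals.length : Int) 1).Pairwise (· < ·) := by
    rw [hr_map]
    exact (List.pairwise_map).mpr ((List.pairwise_lt_range).imp (fun {a b} h => by exact_mod_cast h))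
  have hr_nodup : (PySem.List.pyRange 0 (vals.length : Int) 1).Nodup := by
    rw [hr_map]
    exact (List.nodup_range).map hcast_inj
  have hperm0 : (o0 :: rest).Perm (PySem.List.pyRange 0 (vals.length : Int) 1) := by
    rw [← horder]; exact PySem.List.sorted_perm _ _ _
  have hlex : (o0 :: rest).Pairwise
      (fun a b => pvGetB vals a < pvGetB vals b ∨ (pvGetB vals a = pvGetB vals b ∧ a < b)) := by
    have := pvSorted_pairwise_lex (fun i => pvGetB vals i) _ hr_lt
    rw [horder] at this
    simpa [pvLex] using this
  have hmem_order : ∀ i : Int, i ∈ o0 :: rest ↔ (0 ≤ i ∧ i < (vals.length : Int)) := by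
    intro i
    rw [hperm0.mem_iff, PySem.List.mem_pyRange_one]
  have hnd_order : (o0 :: rest).Nodup := hperm0.nodup_iff.mpr hr_nodup
  have hsub : List.Sublist
      (o0 :: (((o0 :: rest).zip rest).filterMap
        (fun pi => if !(pvGetB vals pi.1 == pvGetB vals pi.2) then some pi.2 else none)))
      (o0 :: rest) := by
    refine List.Sublist.cons₂ o0 ?_
    have := pvSel_sublist
      (fun pi => if !(pvGetB vals pi.1 == pvGetB vals pi.2) then some pi.2 else none)
      (by intro p; dsimp only; split
          · exact Or.inr rfl
          · exact Or.inl rfl) (o0 :: rest)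
    simpa [List.drop_one] using this
  have hnd_H := hsub.nodup hnd_order
  have hnd_F : (((List.range vals.length).filter (fun i => pvFoN vals i)).map
      (fun i : Nat => (i : Int))).Nodup :=
    ((List.nodup_range).filter _).map hcast_inj
  apply (List.perm_ext_iff_of_nodup hnd_H hnd_F).mpr
  intro q
  have hmemF : q ∈ ((List.range vals.length).filter (fun i => pvFoN vals i)).map (fun i : Nat => (i : Int))
      ↔ (0 ≤ q ∧ q < (vals.length : Int)
          ∧ ∀ j : Int, 0 ≤ j → j < q → pvGetB vals j ≠ pvGetB vals q) := by
    constructor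
    · intro hq
      simp only [List.mem_map, List.mem_filter, List.mem_range] at hq
      obtain ⟨k, ⟨hk, hfo⟩, rfl⟩ := hq
      refine ⟨by exact_mod_cast Nat.zero_le k, by exact_mod_cast hk, ?_⟩
      intro j hj0 hjk he
      have hjc : ((j.toNat : Int)) = j := Int.toNat_of_nonneg hj0
      have hjlt : j.toNat < k := by omega
      refine (hfoN k).mp hfo j.toNat hjlt ?_
      rw [← hgetb j.toNat, ← hgetb k, hjc]
      exact he
    · rintro ⟨h0, hn', hfo⟩
      simp only [List.mem_map, List.mem_filter, List.mem_range]
      refine ⟨q.toNat, ⟨by omega, (hfoN q.toNat).mpr ?_⟩, by omega⟩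
      intro j hj he
      have hq' : ((q.toNat : Int)) = q := Int.toNat_of_nonneg h0
      refine hfo (j : Int) (by exact_mod_cast Nat.zero_le j) (by omega) ?_
      rw [hgetb j, ← hq', hgetb q.toNat]
      exact he
  rw [hmemF]
  have hselmem : q ∈ (((o0 :: rest).zip rest).filterMap
        (fun pi => if !(pvGetB vals pi.1 == pvGetB vals pi.2) then some pi.2 else none))
      ↔ ∃ p, (p, q) ∈ (o0 :: rest).zip rest ∧ pvGetB vals p ≠ pvGetB vals q := by
    rw [List.mem_filterMap]
    constructor
    · rintro ⟨pi, hpi, hsome⟩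
      by_cases heq : pvGetB vals pi.1 = pvGetB vals pi.2
      · rw [if_neg (by simp [heq])] at hsome; simp at hsome
      · rw [if_pos (by simp [heq])] at hsome
        obtain rfl := Option.some.inj hsome
        exact ⟨pi.1, by simpa using hpi, heq⟩
    · rintro ⟨p, hzip, hne⟩
      exact ⟨(p, q), hzip, by simp [hne]⟩
  constructor
  · intro hq
    rcases List.mem_cons.mp hq with rfl | hq2
    · have hb := (hmem_order q).mp List.mem_cons_self
      refine ⟨hb.1, hb.2, ?_⟩
      intro j hj0 hjq
      have hjmem : j ∈ q :: rest := (hmem_order j).mpr ⟨hj0, by omega⟩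
      rcases List.mem_cons.mp hjmem with rfl | hjr
      · omega
      · rcases (List.pairwise_cons.mp hlex).1 j hjr with h | ⟨h, hlt⟩
        · intro he; rw [he] at h; exact lt_irrefl _ h
        · omega
    · obtain ⟨p, hzip, hne⟩ := hselmem.mp hq2
      obtain ⟨u, v, huv⟩ := pvZipAdj_of_mem p q (o0 :: rest) (by simpa [List.drop_one] using hzip)
      have hqmem : q ∈ o0 :: rest := by rw [huv]; simp
      have hb := (hmem_order q).mp hqmem
      refine ⟨hb.1, hb.2, ?_⟩
      intro j hj0 hjq he
      rw [huv, List.pairwise_append] at hlex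
      obtain ⟨hu, hpqv, hcross⟩ := hlex
      have hpq := (List.pairwise_cons.mp hpqv).1 q (by simp)
      have hgpq : pvGetB vals p < pvGetB vals q := by
        rcases hpq with h | ⟨h, _⟩
        · exact h
        · exact absurd h hne
      have hjmem : j ∈ o0 :: rest := (hmem_order j).mpr ⟨hj0, by omega⟩
      rw [huv] at hjmem
      rcases List.mem_append.mp hjmem with hju | hjc
      · rcases hcross j hju p (by simp) with h | ⟨h, _⟩
        · have h2 := lt_trans h hgpq
          rw [he] at h2; exact lt_irrefl _ h2
        · exact absurd (h ▸ he) (ne_of_lt hgpq)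
      · rcases List.mem_cons.mp hjc with rfl | hjc2
        · exact hne he
        · rcases List.mem_cons.mp hjc2 with rfl | hjv
          · omega
          · rcases (List.pairwise_cons.mp (List.pairwise_cons.mp hpqv).2).1 j hjv with h | ⟨h, hlt⟩
            · rw [he] at h; exact lt_irrefl _ h
            · omega
  · rintro ⟨h0, hn', hfo⟩
    have hqmem : q ∈ o0 :: rest := (hmem_order q).mpr ⟨h0, hn'⟩
    rcases List.mem_cons.mp hqmem with rfl | hqr
    · exact List.mem_cons_self
    · obtain ⟨u, p, v, huv⟩ := pvPredDecomp q rest o0 hqr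
      have hpmem : p ∈ o0 :: rest := by rw [huv]; simp
      have hpb := (hmem_order p).mp hpmem
      rw [huv, List.pairwise_append] at hlex
      obtain ⟨hu, hpqv, hcross⟩ := hlex
      have hpq := (List.pairwise_cons.mp hpqv).1 q (by simp)
      have hne : pvGetB vals p ≠ pvGetB vals q := by
        intro he
        rcases hpq with h | ⟨h, hlt⟩
        · exact absurd he (ne_of_lt h)
        · exact hfo p hpb.1 hlt he
      refine List.mem_cons_of_mem _ (hselmem.mpr ⟨p, ?_, hne⟩)
      have hmz := pvMem_zipAdj p q u v
      rw [← huv] at hmz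
      simpa [List.drop_one] using hmz

theorem pvCapB_eq (vals : List Int) (xs : List Int) : ∀ (out : List Int) (m : Int),
    pvCapB vals xs out m = out ++ List.take (max 1 (m - out.length).toNat) (xs.map (pvGetB vals)) := by
  induction xs with
  | nil => intro out m; simp [pvCapB]
  | cons i rest ih =>
    intro out m
    by_cases hbrk : m ≤ (((out ++ [pvGetB vals i]).length : Nat) : Int)
    · have h1 : max 1 (m - out.length).toNat = 1 := by
        simp only [List.length_append, List.length_cons, List.length_nil] at hbrk; omega
      simp only [pvCapB, hbrk, decide_true, if_pos, h1]
      simp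
    · have h2 : max 1 (m - out.length).toNat - 1
          = max 1 (m - (((out ++ [pvGetB vals i]).length : Nat) : Int)).toNat := by
        simp only [List.length_append, List.length_cons, List.length_nil] at hbrk ⊢; omega
      simp only [pvCapB, hbrk, decide_false, if_neg, Bool.false_eq_true, not_false_iff]
      rw [ih (out ++ [pvGetB vals i]) m, ← h2]
      have hk : max 1 (m - out.length).toNat ≠ 0 := by omega
      rw [show List.take (max 1 (m - out.length).toNat) ((i :: rest).map (pvGetB vals))
            = pvGetB vals i :: List.take (max 1 (m - out.length).toNat - 1) (rest.map (pvGetB vals)) by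
        rcases Nat.exists_eq_succ_of_ne_zero hk with ⟨k, hkk⟩
        rw [hkk]; simp]
      simp

theorem pvB_eq (s : String) (m : Int) (h : ¬ s.toList.length = 0) :
    parse_csv_int_values_py_alt (some s) m
      = List.take (max 1 m.toNat) (PySem.List.dedup (pvValidOf (some s))) := by
  have hval : pvValidOf (some s) = pvValsB s.toList := by
    rw [pvValsB_eq]; rfl
  rw [hval]
  show (if s.toList.length = 0 then [] else _) = _
  rw [if_neg h]
  have hgetb : ∀ k : Nat, pvGetB (pvValsB s.toList) (k : Int) = (pvValsB s.toList).getD k 0 := by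
    intro k; simpa [pvGetB] using PySem.List.pyGetD_natCast (pvValsB s.toList) k 0
  cases hord : PySem.List.sorted
      (PySem.List.pyRange 0 ((pvValsB s.toList).length : Int) 1)
      (fun i => pvGetB (pvValsB s.toList) i) with
  | nil =>
    have hperm := PySem.List.sorted_perm
      (PySem.List.pyRange 0 ((pvValsB s.toList).length : Int) 1)
      (fun i => pvGetB (pvValsB s.toList) i) false
    rw [hord] at hperm
    have hr := hperm.symm.eq_nil
    have hn0 : (pvValsB s.toList).length = 0 := by
      by_contra hn
      have h0m : (0 : Int) ∈ PySem.List.pyRange 0 ((pvValsB s.toList).length : Int) 1 :=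
        PySem.List.mem_pyRange_one.mpr
          ⟨le_refl 0, by exact_mod_cast Nat.pos_of_ne_zero hn⟩
      rw [hr] at h0m
      simp at h0m
    have hvnil : pvValsB s.toList = [] := List.eq_nil_of_length_eq_zero hn0
    rw [hvnil]
    simp [pvDedup_eq, pvDFilter]
  | cons o0 rest =>
    have hperm := pvHeads_perm (pvValsB s.toList) o0 rest hord
    have hFlt : ((((List.range (pvValsB s.toList).length).filter
        (fun i => pvFoN (pvValsB s.toList) i)).map (fun i : Nat => (i : Int)))).Pairwise
        (fun a b => (fun i : Int => i) a < (fun i : Int => i) b) := by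
      refine (List.pairwise_map).mpr ?_
      exact ((List.pairwise_lt_range).filter _).imp (fun {a b} hab => by simpa using hab)
    have hsorted := PySem.List.sorted_eq_of_perm_of_pairwise_lt _
      ((((List.range (pvValsB s.toList).length).filter
        (fun i => pvFoN (pvValsB s.toList) i)).map (fun i : Nat => (i : Int))))
      (fun i : Int => i) hperm.symm hFlt
    dsimp only
    rw [hsorted]
    rw [pvCapB_eq]
    rw [List.map_map, pvDedup_eq, pvDFilter_firstOcc _ []]
    rw [show (fun i => decide ((pvValsB s.toList).getD i 0 ∉ ([] : List Int))
          && pvFoN (pvValsB s.toList) i) = fun i => pvFoN (pvValsB s.toList) i from by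
      funext i; simp]
    rw [List.map_congr_left (l := (List.range (pvValsB s.toList).length).filter
          (fun i => pvFoN (pvValsB s.toList) i))
        (f := pvGetB (pvValsB s.toList) ∘ (fun i : Nat => (i : Int)))
        (g := fun i => (pvValsB s.toList).getD i 0)
        (fun i _ => by simp [Function.comp, hgetb i])]
    simp

-- ===== VERDICT =====
theorem parse_csv_int_values_py_spec : Claim_equal_parse_csv_int_values_py := by
  intro raw m _
  unfold Spec_parse_csv_int_values_py
  match raw with
  | none => rfl
  | some s =>
    by_cases hs : s.toList.length = 0
    · show (if s.toList.length = 0 then [] else _)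
        = (if s.toList.length = 0 then ([] : List Int) else _)
      rw [if_pos hs, if_pos hs]
    · rw [pvA_eq s m hs, pvB_eq s m hs]
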